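-- pv_equiv track=rewrite | github.com/p1rateg0ld/AWS_Scripts | CreateSnapshot.py | get_next_drive_name
-- ===== SOURCE A (Python) =====
-- def get_next_drive_name(device_name_list):
--     range1 = 'b'
--     range2 = 'z'
--     # Generates the characters from range1 to range2, inclusive
--     def letter_range(range1,range2):
--         for letter in range(ord(range1), ord(range2)+1):
--             yield chr(letter)
--
--     string = ''
--     for letter in letter_range(range1,range2):
--         seq = ('xvd',letter)
--         device_name = string.join(seq)
--         if device_name not in device_name_list:
--             return device_name
-- ===== SOURCE B (Python) =====
-- def get_next_drive_name(device_name_list):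
--     candidates = {'xvd' + chr(c) for c in range(ord('b'), ord('z') + 1)}
--     return min(candidates - set(device_name_list), default=None)
-- ===== Notes on version B (the rewrite author's own statement) =====
-- stated objective: simpler
-- what changed: Replaces the one-at-a-time candidate loop with an up-front set difference (all candidate names minus the used ones) followed by min(..., default=None), which equals the first free letter because the candidate names are lexicographically ordered.
import Mathlib
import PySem

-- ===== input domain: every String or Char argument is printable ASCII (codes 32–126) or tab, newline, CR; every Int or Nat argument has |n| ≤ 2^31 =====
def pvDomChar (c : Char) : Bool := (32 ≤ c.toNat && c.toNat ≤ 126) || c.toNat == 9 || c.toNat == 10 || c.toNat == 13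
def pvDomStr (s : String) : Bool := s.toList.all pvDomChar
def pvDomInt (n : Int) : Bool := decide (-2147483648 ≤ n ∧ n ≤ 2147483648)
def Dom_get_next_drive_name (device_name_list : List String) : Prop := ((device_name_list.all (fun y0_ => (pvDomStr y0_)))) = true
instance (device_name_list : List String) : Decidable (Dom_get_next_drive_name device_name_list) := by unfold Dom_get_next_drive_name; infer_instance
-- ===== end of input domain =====

-- B replaces A's one-at-a-time candidate loop by an up-front set difference plus min(..., default=None); objective: simpler.

-- ===== PORT A =====
-- chr(i) for the codes 98..122 is exactly Char.ofNat i.toNat (ASCII range; exact here)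
def pvNameOf (i : Int) : String := "xvd" ++ String.ofList [Char.ofNat i.toNat]

-- A's for-loop over letter_range('b','z'): return the first name not in the list, else fall off (None)
def pvGoA (device_name_list : List String) : List Int → Option String
  | [] => none
  | i :: rest =>
    let device_name := pvNameOf i
    if device_name ∈ device_name_list then pvGoA device_name_list rest else some device_name

def get_next_drive_name (device_name_list : List String) : Option String :=
  pvGoA device_name_list (PySem.List.pyRange 98 123 1)

-- ===== PORT B =====
def get_next_drive_name_alt (device_name_list : List String) : Option String :=
  let candidates : PySem.Set String :=
    PySem.Set.ofList ((PySem.List.pyRange 98 123 1).map pvNameOf)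
  let remaining := PySem.Set.diff candidates (PySem.Set.ofList device_name_list)
  PySem.List.min? remaining (fun x => x)

-- ===== PRECONDITION & SPEC =====
def Spec_get_next_drive_name (device_name_list : List String) (out : Option String) : Prop := out = get_next_drive_name_alt device_name_list
instance (device_name_list : List String) (out : Option String) : Decidable (Spec_get_next_drive_name device_name_list out) := by unfold Spec_get_next_drive_name; infer_instance

-- ===== CLAIM (what is proved, stated in full; the proofs are below) =====
def Claim_equal_get_next_drive_name : Prop := ∀ (device_name_list : List String), Dom_get_next_drive_name device_name_list → Spec_get_next_drive_name device_name_list (get_next_drive_name device_name_list)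

-- ===== LEMMAS AND PROOFS =====

-- A's loop is find? over the mapped candidate names
theorem pvGoA_eq_find? (xs : List String) (L : List Int) :
    pvGoA xs L = (L.map pvNameOf).find? (fun c => !(decide (c ∈ xs))) := by
  induction L with
  | nil => rfl
  | cons i rest ih =>
    simp only [pvGoA, List.map_cons, List.find?_cons]
    by_cases h : pvNameOf i ∈ xs <;> simp [h, ih]

-- foldl min over elements all ≥ x is x
theorem pvFoldlMin_of_le {α : Type} [LinearOrder α] (t : List α) (x : α)
    (h : ∀ y ∈ t, x ≤ y) : t.foldl min x = x := by
  induction t generalizing x with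
  | nil => rfl
  | cons a t ih =>
    simp only [List.foldl_cons]
    have hx : min x a = x := min_eq_left (h a (by simp))
    rw [hx]
    exact ih x (fun y hy => h y (by simp [hy]))

-- min? (id key) of a strictly ascending list is its head
theorem pvMin?_of_pairwise {α : Type} [LinearOrder α] (l : List α)
    (h : l.Pairwise (· < ·)) : PySem.List.min? l (fun x => x) = l.head? := by
  cases l with
  | nil => simp [PySem.List.min?]
  | cons x t =>
    rw [PySem.List.min?_id_cons]
    have hx : ∀ y ∈ t, x ≤ y := fun y hy => le_of_lt ((List.pairwise_cons.mp h).1 y hy)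
    simp [pvFoldlMin_of_le t x hx]

theorem pvContains_ofList (xs : List String) (c : String) :
    (PySem.Set.ofList xs).contains c = decide (c ∈ xs) := by
  rw [Bool.eq_iff_iff]
  simp [PySem.Set.mem_ofList]

theorem get_next_drive_name_spec : Claim_equal_get_next_drive_name := by
  intro xs _
  unfold Spec_get_next_drive_name get_next_drive_name get_next_drive_name_alt
  show pvGoA xs (PySem.List.pyRange 98 123 1) =
    PySem.List.min? (PySem.Set.diff
      (PySem.Set.ofList ((PySem.List.pyRange 98 123 1).map pvNameOf))
      (PySem.Set.ofList xs)) (fun x => x)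
  have hcand : PySem.Set.ofList ((PySem.List.pyRange 98 123 1).map pvNameOf)
      = (PySem.List.pyRange 98 123 1).map pvNameOf := by decide
  rw [hcand]
  have hdiff : PySem.Set.diff ((PySem.List.pyRange 98 123 1).map pvNameOf) (PySem.Set.ofList xs)
      = ((PySem.List.pyRange 98 123 1).map pvNameOf).filter (fun c => !(decide (c ∈ xs))) := by
    unfold PySem.Set.diff
    exact List.filter_congr (fun c _ => by rw [pvContains_ofList])
  rw [hdiff]
  have hpair : (((PySem.List.pyRange 98 123 1).map pvNameOf).filter (fun c => !(decide (c ∈ xs)))).Pairwise (· < ·) := by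
    have hN : ((PySem.List.pyRange 98 123 1).map pvNameOf).Pairwise (· < ·) := by
      have hlit : (PySem.List.pyRange 98 123 1).map pvNameOf
          = ["xvdb","xvdc","xvdd","xvde","xvdf","xvdg","xvdh","xvdi","xvdj","xvdk","xvdl","xvdm","xvdn","xvdo","xvdp","xvdq","xvdr","xvds","xvdt","xvdu","xvdv","xvdw","xvdx","xvdy","xvdz"] := by decide
      rw [hlit]
      simp only [String.lt_iff_toList_lt]
      decide
    exact List.Pairwise.filter _ hN
  rw [pvMin?_of_pairwise _ hpair, pvGoA_eq_find?, List.head?_filter]
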